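-- pv_equiv track=rewrite | github.com/kadavilrahul/coding_task_manager | version_02_py_sophisticated/modifiers/line_identifier.py | _find_import_section_end
-- ===== SOURCE A (Python) =====
-- from typing import Dict, Any, List, Optional, Tuple, Set
--
-- def _find_import_section_end(lines: List[str]) -> int:
--     """Find the end of the import section."""
--     last_import_line = -1
--
--     for i, line in enumerate(lines):
--         stripped = line.strip()
--         if (stripped.startswith('import ') or
--             stripped.startswith('from ') or
--             stripped.startswith('#') and 'import' in stripped.lower() or
--             not stripped):  # Empty lines in import section
--             last_import_line = i
--         elif stripped and not stripped.startswith('#'):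
--             # Found non-import, non-comment line
--             break
--
--     return last_import_line + 1
-- ===== SOURCE B (Python) =====
-- from typing import List
--
-- def _is_import_like(s: str) -> bool:
--     return (not s or s.startswith('import ') or s.startswith('from ')
--             or (s.startswith('#') and 'import' in s.lower()))
--
-- def _find_import_section_end(lines: List[str]) -> int:
--     """Find the end of the import section (two-pass: boundary, then backward scan)."""
--     b = len(lines)
--     for i, line in enumerate(lines):
--         s = line.strip()
--         if s and not s.startswith('#') and not s.startswith('import ') and not s.startswith('from '):
--             b = i
--             break
--     for i in range(b - 1, -1, -1):
--         if _is_import_like(lines[i].strip()):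
--             return i + 1
--     return 0
-- ===== Notes on version B (the rewrite author's own statement) =====
-- stated objective: alternative
-- what changed: Replaced A's single forward loop carrying a last-import-line accumulator with an early break by two separate passes: first find the boundary (index of the first real code line), then scan backward from it for the last import-section-like line.
import Mathlib
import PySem

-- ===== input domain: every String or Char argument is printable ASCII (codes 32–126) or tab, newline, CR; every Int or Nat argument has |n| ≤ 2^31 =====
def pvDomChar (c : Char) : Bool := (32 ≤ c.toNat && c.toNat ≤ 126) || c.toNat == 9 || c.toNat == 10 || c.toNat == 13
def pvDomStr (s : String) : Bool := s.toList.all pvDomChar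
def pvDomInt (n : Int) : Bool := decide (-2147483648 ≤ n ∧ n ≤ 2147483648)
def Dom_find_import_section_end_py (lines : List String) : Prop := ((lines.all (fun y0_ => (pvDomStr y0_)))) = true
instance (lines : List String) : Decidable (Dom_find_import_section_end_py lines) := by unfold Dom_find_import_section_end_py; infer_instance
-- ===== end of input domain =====

-- B replaces A's single accumulator loop (last import-like index, early break) by two passes:
-- find the boundary (first code line), then scan backward for the last import-like line. Objective: alternative decomposition.

-- ===== PORT A =====
-- the big or-condition of A's first branch, in A's order (precedence: 'and' binds tighter than 'or')
def pvCondA (s : String) : Bool :=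
  PySem.Str.startswith s "import " || PySem.Str.startswith s "from " ||
  (PySem.Str.startswith s "#" && PySem.Str.isIn "import" (PySem.Str.lower s)) ||
  (PySem.Str.len s == 0)

-- the for-loop over enumerate(lines) with state (i, last_import_line); returns last_import_line + 1
def pvLoopA : List String → Int → Int → Int
  | [], _, acc => acc + 1
  | l :: rest, i, acc =>
    if pvCondA (PySem.Str.strip l) then pvLoopA rest (i + 1) i
    else if !(PySem.Str.len (PySem.Str.strip l) == 0) && !PySem.Str.startswith (PySem.Str.strip l) "#" then
      acc + 1  -- break
    else pvLoopA rest (i + 1) acc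

def find_import_section_end_py (lines : List String) : Int :=
  pvLoopA lines 0 (-1)

-- ===== PORT B =====
def pvImportLikeB (s : String) : Bool :=
  (PySem.Str.len s == 0) || PySem.Str.startswith s "import " || PySem.Str.startswith s "from " ||
  (PySem.Str.startswith s "#" && PySem.Str.isIn "import" (PySem.Str.lower s))

-- a 'code' line: stripped non-empty, not a comment, not an import/from line
def pvCodeB (s : String) : Bool :=
  !(PySem.Str.len s == 0) && !PySem.Str.startswith s "#" &&
  !PySem.Str.startswith s "import " && !PySem.Str.startswith s "from "

-- first pass: index of the first code line (len(lines) if none)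
def pvFirstCodeB : List String → Nat
  | [] => 0
  | l :: rest => if pvCodeB (PySem.Str.strip l) then 0 else pvFirstCodeB rest + 1

-- second pass: for i in range(b-1, -1, -1): if import-like: return i+1; return 0
def pvBackB (lines : List String) : Nat → Int
  | 0 => 0
  | n + 1 =>
    if pvImportLikeB (PySem.Str.strip (lines.getD n "")) then ((n : Int) + 1)
    else pvBackB lines n

def find_import_section_end_py_alt (lines : List String) : Int :=
  pvBackB lines (pvFirstCodeB lines)

-- ===== PRECONDITION & SPEC =====
def Spec_find_import_section_end_py (lines : List String) (out : Int) : Prop := out = find_import_section_end_py_alt lines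
instance (lines : List String) (out : Int) : Decidable (Spec_find_import_section_end_py lines out) := by unfold Spec_find_import_section_end_py; infer_instance

-- ===== CLAIM (what is proved, stated in full; the proofs are below) =====
def Claim_equal_find_import_section_end_py : Prop := ∀ (lines : List String), Dom_find_import_section_end_py lines → Spec_find_import_section_end_py lines (find_import_section_end_py lines)

-- ===== LEMMAS AND PROOFS =====

-- last import-like index strictly before the first code line (spec shared by both proofs)
def pvLast : List String → Option Nat
  | [] => none
  | l :: rest =>
    if pvCodeB (PySem.Str.strip l) then none
    else if pvImportLikeB (PySem.Str.strip l) then some ((pvLast rest).elim 0 (· + 1))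
    else (pvLast rest).map (· + 1)

-- last import-like index, no code cutoff
def pvLi : List String → Option Nat
  | [] => none
  | l :: rest =>
    match pvLi rest with
    | some j => some (j + 1)
    | none => if pvImportLikeB (PySem.Str.strip l) then some 0 else none

lemma condA_eq (s : String) : pvCondA s = pvImportLikeB s := by
  simp [pvCondA, pvImportLikeB, Bool.or_comm, Bool.or_left_comm]

lemma code_false_of_importLike {s : String} (h : pvImportLikeB s = true) : pvCodeB s = false := by
  cases h0 : (PySem.Str.len s == 0) <;> cases h1 : PySem.Str.startswith s "#" <;>
    cases h2 : PySem.Str.startswith s "import " <;> cases h3 : PySem.Str.startswith s "from " <;>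
    simp_all [pvImportLikeB, pvCodeB]

lemma break_eq_code {s : String} (h : pvImportLikeB s = false) :
    (!(PySem.Str.len s == 0) && !PySem.Str.startswith s "#") = pvCodeB s := by
  cases h0 : (PySem.Str.len s == 0) <;> cases h1 : PySem.Str.startswith s "#" <;>
    cases h2 : PySem.Str.startswith s "import " <;> cases h3 : PySem.Str.startswith s "from " <;>
    simp_all [pvImportLikeB, pvCodeB]

lemma loopA_eq (lines : List String) :
    ∀ i acc : Int, pvLoopA lines i acc = (pvLast lines).elim (acc + 1) (fun j => i + (j : Int) + 1) := by
  induction lines with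
  | nil => intro i acc; simp [pvLoopA, pvLast]
  | cons l rest ih =>
    intro i acc
    rw [pvLoopA, pvLast, condA_eq]
    cases hI : pvImportLikeB (PySem.Str.strip l) with
    | true =>
      simp only [code_false_of_importLike hI, Bool.false_eq_true, if_false, ih]
      cases pvLast rest <;> simp <;> omega
    | false =>
      simp only [Bool.false_eq_true, if_false, break_eq_code hI]
      cases hC : pvCodeB (PySem.Str.strip l) with
      | true => simp
      | false =>
        simp only [Bool.false_eq_true, if_false, ih]
        cases pvLast rest <;> simp <;> omega

lemma last_eq_li_take (lines : List String) :
    pvLast lines = pvLi (lines.take (pvFirstCodeB lines)) := by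
  induction lines with
  | nil => simp [pvLast, pvLi]
  | cons l rest ih =>
    rw [pvLast, pvFirstCodeB]
    cases hC : pvCodeB (PySem.Str.strip l) with
    | true => simp [pvLi]
    | false =>
      simp only [Bool.false_eq_true, if_false, List.take_succ_cons]
      rw [pvLi, ← ih]
      cases hI : pvImportLikeB (PySem.Str.strip l) <;> cases pvLast rest <;> simp [Option.elim]

lemma li_append_singleton (xs : List String) (x : String) :
    pvLi (xs ++ [x]) =
      if pvImportLikeB (PySem.Str.strip x) then some xs.length else pvLi xs := by
  induction xs with
  | nil => simp [pvLi]
  | cons y ys ih =>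
    rw [List.cons_append, pvLi, ih, pvLi]
    cases hI : pvImportLikeB (PySem.Str.strip x) <;> cases pvLi ys <;> simp

lemma firstCode_le_length (lines : List String) : pvFirstCodeB lines ≤ lines.length := by
  induction lines with
  | nil => simp [pvFirstCodeB]
  | cons l rest ih =>
    rw [pvFirstCodeB]
    cases pvCodeB (PySem.Str.strip l) <;> simp <;> omega

lemma backB_eq (lines : List String) :
    ∀ n : Nat, n ≤ lines.length →
      pvBackB lines n = (pvLi (lines.take n)).elim 0 (fun j => (j : Int) + 1) := by
  intro n
  induction n with
  | zero => intro _; simp [pvBackB, pvLi]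
  | succ n ih =>
    intro hn
    have hlt : n < lines.length := by omega
    rw [pvBackB, List.take_add_one, List.getElem?_eq_getElem hlt]
    have hgetD : lines.getD n "" = lines[n] := by
      simp [List.getD, List.getElem?_eq_getElem hlt]
    rw [hgetD]
    simp only [Option.toList_some]
    rw [li_append_singleton]
    have hlen : (lines.take n).length = n := by simp [List.length_take]; omega
    cases hI : pvImportLikeB (PySem.Str.strip lines[n]) with
    | true => simp [hlen]
    | false => simp only [Bool.false_eq_true, if_false]; exact ih (by omega)

-- ===== VERDICT (by name: the statement is the Claim_ definition above) =====
theorem find_import_section_end_py_spec : Claim_equal_find_import_section_end_py := by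
  intro lines _
  unfold Spec_find_import_section_end_py find_import_section_end_py find_import_section_end_py_alt
  rw [loopA_eq, backB_eq lines _ (firstCode_le_length lines), ← last_eq_li_take]
  cases pvLast lines <;> simp
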